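-- pv_equiv track=rewrite | github.com/yutaodou/python-alg | alg/horse_racing.py | race
-- ===== SOURCE A (Python) =====
-- from typing import List
--
-- def race(horses: List[int], king_horses: List[int]):
--     my_sorted_by_power = sorted(horses)
--
--     my_paired = set()
--     pairs = []
--
--     def find_pair_for(king_horse: List[int]) -> int:
--         # return winning horse with least horse power if can win
--         for my in my_sorted_by_power:
--             if my > king_horse and my not in my_paired:
--                 return my
--
--         # return horses with smallest possible horses if not possible to win
--         for my in my_sorted_by_power:
--             if my not in my_paired:
--                 return my
--
--         return None
--
--     for king_horse in king_horses:
--         my_pair = find_pair_for(king_horse)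
--         my_paired.add(my_pair)
--         pairs.append([my_pair, king_horse])
--
--     return pairs
-- ===== SOURCE B (Python) =====
-- from typing import List
--
--
-- def race(horses: List[int], king_horses: List[int]):
--     # distinct sorted pool; A's set-of-values pairing means each VALUE is usable once
--     remaining = sorted(set(horses))
--     pairs = []
--     for king in king_horses:
--         lo, hi = 0, len(remaining)
--         while lo < hi:  # binary search: first remaining value > king
--             mid = (lo + hi) // 2
--             if remaining[mid] > king:
--                 hi = mid
--             else:
--                 lo = mid + 1
--         i = lo if lo < len(remaining) else 0
--         pairs.append([remaining.pop(i), king])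
--     return pairs
-- ===== Notes on version B (the rewrite author's own statement) =====
-- stated objective: alternative
-- what changed: Instead of rescanning the full sorted list twice per king with a paired-set membership test, B keeps one shrinking sorted list of distinct values and binary-searches it for the first value beating the king (falling back to its head), removing the chosen value by index.
-- outside the precondition, e.g. on race([], [1]): A returns [[None, 1]], B raises IndexError
import Mathlib
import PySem

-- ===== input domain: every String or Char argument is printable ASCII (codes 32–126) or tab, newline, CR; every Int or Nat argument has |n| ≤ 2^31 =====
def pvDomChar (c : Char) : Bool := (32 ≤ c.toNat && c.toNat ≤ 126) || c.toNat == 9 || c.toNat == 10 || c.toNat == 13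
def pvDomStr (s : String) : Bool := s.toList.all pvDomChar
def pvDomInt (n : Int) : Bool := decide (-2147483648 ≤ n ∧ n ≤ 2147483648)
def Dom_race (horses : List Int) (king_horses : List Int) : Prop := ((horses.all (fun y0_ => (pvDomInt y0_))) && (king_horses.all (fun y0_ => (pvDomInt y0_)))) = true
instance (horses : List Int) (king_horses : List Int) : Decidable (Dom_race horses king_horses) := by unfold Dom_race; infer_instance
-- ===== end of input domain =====

-- B replaces A's two full scans per king (over the whole sorted list, with a paired-set
-- membership test) by a shrinking sorted list of distinct values, binary search and
-- deletion by index (an alternative algorithm intended to cut the per-king work).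

-- ===== PORT A =====
-- first-match loop ('for my in my_sorted_by_power: if …: return my')
def raceScan (p : Int → Bool) : List Int → Option Int
  | [] => none
  | m :: rest => if p m then some m else raceScan p rest

-- find_pair_for: first scan (my > king and unpaired), then second scan (unpaired)
def raceFindPair (s : List Int) (paired : PySem.Set Int) (k : Int) : Option Int :=
  match raceScan (fun m => decide (m > k) && !(paired.contains m)) s with
  | some m => some m
  | none => raceScan (fun m => !(paired.contains m)) s

-- the main 'for king_horse in king_horses' loop
def raceLoop (s : List Int) : List Int → PySem.Set Int → List (List Int) → List (List Int)
  | [], _, pairs => pairs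
  | k :: ks, paired, pairs =>
    match raceFindPair s paired k with
    | some m => raceLoop s ks (paired.add m) (pairs ++ [[m, k]])
    | none => raceLoop s ks paired pairs
      -- Python appends [None, king_horse] here: None is not an Int; unreachable under Pre_race

def race (horses : List Int) (king_horses : List Int) : List (List Int) :=
  raceLoop (PySem.List.sorted horses (fun x => x)) king_horses PySem.Set.empty []

-- ===== PORT B =====
-- the hand-written 'while lo < hi' binary search of Source B, step for step
def raceAltBisect (rem : List Int) (k : Int) (lo hi : Nat) : Nat :=
  if lo < hi then
    let mid := (lo + hi) / 2
    if rem.getD mid 0 > k then raceAltBisect rem k lo mid  -- mid is always in range here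
    else raceAltBisect rem k (mid + 1) hi
  else lo
termination_by hi - lo
decreasing_by all_goals omega

-- the 'for king in king_horses' loop of Source B
def raceAltLoop : List Int → List Int → List (List Int) → List (List Int)
  | _, [], pairs => pairs
  | rem, k :: ks, pairs =>
    let lo := raceAltBisect rem k 0 rem.length
    let i : Nat := if lo < rem.length then lo else 0
    match PySem.List.pop? rem (i : Int) with
    | some (v, rem') => raceAltLoop rem' ks (pairs ++ [[v, k]])
    | none => raceAltLoop rem ks pairs
      -- Python raises IndexError here (remaining is empty); unreachable under Pre_race

def race_alt (horses : List Int) (king_horses : List Int) : List (List Int) :=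
  raceAltLoop (PySem.List.sorted (PySem.Set.ofList horses) (fun x => x)) king_horses []

-- ===== PRECONDITION & SPEC =====
-- Pre_ excludes inputs with more king horses than DISTINCT own horses: there A's pairing
-- pool runs dry and A pads the result with None, which is not an Int (B raises IndexError).
def Pre_race (horses : List Int) (king_horses : List Int) : Prop :=
  king_horses.length ≤ (PySem.Set.ofList horses).length
instance (horses : List Int) (king_horses : List Int) : Decidable (Pre_race horses king_horses) := by
  unfold Pre_race; infer_instance
def pvWitness_race : List Int × List Int := ([3, 1, 2, 2], [2, 5, 0])

def Spec_race (horses : List Int) (king_horses : List Int) (out : List (List Int)) : Prop := out = race_alt horses king_horses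
instance (horses : List Int) (king_horses : List Int) (out : List (List Int)) : Decidable (Spec_race horses king_horses out) := by unfold Spec_race; infer_instance

-- ===== CLAIM (what is proved, stated in full; the proofs are below) =====
def Claim_equal_race : Prop := ∀ (horses : List Int) (king_horses : List Int), Dom_race horses king_horses → Pre_race horses king_horses → Spec_race horses king_horses (race horses king_horses)

-- ===== LEMMAS AND PROOFS =====

-- A first-match scan finds nothing iff nothing matches
lemma raceScan_eq_none {p : Int → Bool} {s : List Int} :
    raceScan p s = none ↔ ∀ w ∈ s, p w = false := by
  induction s with
  | nil => simp [raceScan]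
  | cons a t ih =>
    by_cases ha : p a
    · simp [raceScan, ha]
    · simp only [Bool.not_eq_true] at ha
      simp [raceScan, ha, ih]

-- on a ≤-sorted list, the first match of a value predicate is the least matching value
lemma raceScan_eq_some_min {p : Int → Bool} {s : List Int} {v : Int}
    (hs : s.Pairwise (· ≤ ·)) (hv : v ∈ s) (hpv : p v = true)
    (hmin : ∀ w ∈ s, p w = true → v ≤ w) :
    raceScan p s = some v := by
  induction s with
  | nil => simp at hv
  | cons a t ih =>
    rw [List.pairwise_cons] at hs
    by_cases ha : p a
    · have hva : v ≤ a := hmin a (List.mem_cons_self) ha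
      have hav : v = a := by
        rcases List.mem_cons.mp hv with h | h
        · exact h
        · exact le_antisymm hva (hs.1 v h)
      simp [raceScan, ha, hav]
    · have hvt : v ∈ t := by
        rcases List.mem_cons.mp hv with h | h
        · subst h; exact absurd hpv (by simpa using ha)
        · exact h
      simp only [Bool.not_eq_true] at ha
      simp only [raceScan, ha, Bool.false_eq_true, if_false]
      exact ih hs.2 hvt (fun w hw hpw => hmin w (List.mem_cons_of_mem a hw) hpw)

-- on a ≤-sorted list getD is monotone in the index
lemma getD_mono (rem : List Int) (hs : rem.Pairwise (· ≤ ·)) (i j : Nat)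
    (hij : i ≤ j) (hj : j < rem.length) : rem.getD i 0 ≤ rem.getD j 0 := by
  rcases Nat.eq_or_lt_of_le hij with h | h
  · subst h; rfl
  · rw [List.getD_eq_getElem rem 0 (lt_of_le_of_lt hij hj), List.getD_eq_getElem rem 0 hj]
    exact List.pairwise_iff_getElem.mp hs i j _ _ h

-- the binary search returns the index of the first element greater than k
lemma raceAltBisect_spec (rem : List Int) (k : Int) (hs : rem.Pairwise (· ≤ ·)) :
    ∀ lo hi, lo ≤ hi → hi ≤ rem.length →
    (∀ j, j < lo → rem.getD j 0 ≤ k) →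
    (∀ j, hi ≤ j → j < rem.length → k < rem.getD j 0) →
    raceAltBisect rem k lo hi ≤ rem.length ∧
    (∀ j, j < raceAltBisect rem k lo hi → rem.getD j 0 ≤ k) ∧
    (∀ j, raceAltBisect rem k lo hi ≤ j → j < rem.length → k < rem.getD j 0) := by
  intro lo hi
  fun_induction raceAltBisect rem k lo hi with
  | case1 lo hi hlt mid hgt ih =>
    intro _ h2 hlo hhi
    refine ih (by omega) (by omega) hlo ?_
    intro j hj hjlen
    exact lt_of_lt_of_le hgt (getD_mono rem hs mid j hj hjlen)
  | case2 lo hi hlt mid hgt ih =>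
    intro _ h2 hlo hhi
    refine ih (by omega) h2 ?_ hhi
    intro j hj
    rcases Nat.lt_or_ge j lo with h | h
    · exact hlo j h
    · calc rem.getD j 0 ≤ rem.getD mid 0 := getD_mono rem hs j mid (by omega) (by omega)
        _ ≤ k := by omega
  | case3 lo hi hlt =>
    intro h1 h2 hlo hhi
    exact ⟨by omega, hlo, fun j hj hjlen => hhi j (by omega) hjlen⟩

lemma filter_ne_eq_eraseIdx (l : List Int) (hnd : l.Nodup) (i : Nat) (hi : i < l.length) :
    l.filter (fun x => !(x == l.getD i 0)) = l.eraseIdx i := by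
  induction l generalizing i with
  | nil => simp at hi
  | cons a t ih =>
    rw [List.nodup_cons] at hnd
    cases i with
    | zero =>
      simp only [List.getD_cons_zero, List.eraseIdx_cons_zero, List.filter_cons]
      simp only [beq_self_eq_true, Bool.not_true, Bool.false_eq_true, if_false]
      refine List.filter_eq_self.mpr (fun x hx => ?_)
      have : x ≠ a := fun h => hnd.1 (h ▸ hx)
      simp [this]
    | succ j =>
      simp only [List.length_cons] at hi
      have hj : j < t.length := by omega
      have hmem : t.getD j 0 ∈ t := by
        rw [List.getD_eq_getElem t 0 hj]; exact List.getElem_mem _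
      have hane : a ≠ t.getD j 0 := fun h => hnd.1 (h ▸ hmem)
      simp only [List.getD_cons_succ, List.eraseIdx_cons_succ, List.filter_cons]
      rw [if_pos (by simpa [List.getD] using hane), ih hnd.2 j hj]

-- the central loop invariant: B's remaining list is exactly the not-yet-paired distinct values
lemma raceLoop_eq_raceAltLoop (s D : List Int) (hs : s.Pairwise (· ≤ ·)) (hD : D.Pairwise (· < ·))
    (hmem : ∀ x : Int, x ∈ D ↔ x ∈ s) :
    ∀ (ks : List Int) (paired : PySem.Set Int) (rem : List Int) (pairs : List (List Int)),
      rem = D.filter (fun x => !(paired.contains x)) →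
      ks.length ≤ rem.length →
      raceLoop s ks paired pairs = raceAltLoop rem ks pairs := by
  intro ks
  induction ks with
  | nil => intro paired rem pairs _ _; rfl
  | cons k ks ih =>
    intro paired rem pairs hrem hlen
    have hremlt : rem.Pairwise (· < ·) := hrem ▸ hD.filter _
    have hremle : rem.Pairwise (· ≤ ·) := hremlt.imp le_of_lt
    have hremnd : rem.Nodup := hremlt.imp (fun h => ne_of_lt h)
    have hmemrem : ∀ x : Int, x ∈ rem ↔ x ∈ D ∧ paired.contains x = false := by
      intro x; rw [hrem, List.mem_filter]; simp
    have hlen0 : 0 < rem.length := lt_of_lt_of_le (by simp) hlen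
    obtain ⟨hble, hblo, hbhi⟩ :=
      raceAltBisect_spec rem k hremle 0 rem.length (by omega) le_rfl (by omega) (by omega)
    set lo := raceAltBisect rem k 0 rem.length with hlodef
    set i : Nat := if lo < rem.length then lo else 0 with hidef
    have hilt : i < rem.length := by rw [hidef]; split <;> omega
    set v := rem.getD i 0 with hvdef
    have hvmem : v ∈ rem := by
      rw [hvdef, List.getD_eq_getElem rem 0 hilt]; exact List.getElem_mem _
    have hvD : v ∈ D := ((hmemrem v).mp hvmem).1
    have hvnc : paired.contains v = false := ((hmemrem v).mp hvmem).2
    have hvnp : v ∉ paired := fun h => by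
      rw [(PySem.Set.contains_iff paired v).mpr h] at hvnc; exact absurd hvnc (by simp)
    have hvs : v ∈ s := (hmem v).mp hvD
    have hpop : PySem.List.pop? rem (i : Int) = some (v, rem.eraseIdx i) := by
      rw [PySem.List.pop?_natCast rem i hilt, hvdef, List.getD_eq_getElem rem 0 hilt]
    -- membership of rem from the s side
    have hsrem : ∀ w : Int, w ∈ s → paired.contains w = false → w ∈ rem := by
      intro w hw hnc
      exact (hmemrem w).mpr ⟨(hmem w).mpr hw, hnc⟩
    -- A's find_pair_for returns v
    have hfind : raceFindPair s paired k = some v := by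
      by_cases hcase : lo < rem.length
      · -- a winning horse exists: v = rem[lo] is the least unpaired value > k
        have hieq : i = lo := by rw [hidef, if_pos hcase]
        have hkv : k < v := by rw [hvdef, hieq]; exact hbhi lo le_rfl hcase
        have scan1 : raceScan (fun m => decide (m > k) && !(paired.contains m)) s = some v := by
          refine raceScan_eq_some_min hs hvs (by simp [hkv, hvnp]) ?_
          intro w hw hpw
          simp only [Bool.and_eq_true, decide_eq_true_eq, Bool.not_eq_eq_eq_not,
            Bool.not_true] at hpw
          obtain ⟨j, hjlt, hjw⟩ := List.mem_iff_getElem.mp (hsrem w hw hpw.2)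
          have hjD : rem.getD j 0 = w := by rw [List.getD_eq_getElem rem 0 hjlt, hjw]
          rcases Nat.lt_or_ge j lo with h | h
          · exact absurd (hjD ▸ hblo j h) (by omega)
          · rw [hvdef, hieq, ← hjD]; exact getD_mono rem hremle lo j h hjlt
        unfold raceFindPair
        rw [scan1]
      · -- no unpaired horse beats k: v = rem[0] is the least unpaired value
        have hieq : i = 0 := by rw [hidef, if_neg hcase]
        have scan1 : raceScan (fun m => decide (m > k) && !(paired.contains m)) s = none := by
          refine raceScan_eq_none.mpr (fun w hw => ?_)
          by_cases hc : paired.contains w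
          · simp only [hc, Bool.not_true, Bool.and_false]
          · simp only [Bool.not_eq_true] at hc
            obtain ⟨j, hjlt, hjw⟩ := List.mem_iff_getElem.mp (hsrem w hw hc)
            have hjD : rem.getD j 0 = w := by rw [List.getD_eq_getElem rem 0 hjlt, hjw]
            have : rem.getD j 0 ≤ k := hblo j (by omega)
            simp only [Bool.and_eq_false_iff, decide_eq_false_iff_not, not_lt]
            left; omega
        have scan2 : raceScan (fun m => !(paired.contains m)) s = some v := by
          refine raceScan_eq_some_min hs hvs (by simp [hvnp]) ?_
          intro w hw hpw
          simp only [Bool.not_eq_eq_eq_not, Bool.not_true] at hpw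
          obtain ⟨j, hjlt, hjw⟩ := List.mem_iff_getElem.mp (hsrem w hw hpw)
          rw [hvdef, hieq, ← (by rw [List.getD_eq_getElem rem 0 hjlt, hjw] : rem.getD j 0 = w)]
          exact getD_mono rem hremle 0 j (Nat.zero_le j) hjlt
        unfold raceFindPair
        rw [scan1, scan2]
    -- one step of each loop
    have stepA : raceLoop s (k :: ks) paired pairs
        = raceLoop s ks (paired.add v) (pairs ++ [[v, k]]) := by
      rw [raceLoop, hfind]
    have stepB : raceAltLoop rem (k :: ks) pairs
        = raceAltLoop (rem.eraseIdx i) ks (pairs ++ [[v, k]]) := by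
      rw [raceAltLoop]
      simp only [← hlodef, ← hidef, hpop]
    rw [stepA, stepB]
    -- invariant is preserved: adding v to paired removes exactly index i from rem
    have hcadd : ∀ x : Int, (paired.add v).contains x = (paired.contains x || x == v) := by
      intro x
      rw [Bool.eq_iff_iff, PySem.Set.contains_iff, PySem.Set.mem_add]
      rw [Bool.or_eq_true, beq_iff_eq, PySem.Set.contains_iff]
    have hinv : D.filter (fun x => !((paired.add v).contains x)) = rem.eraseIdx i := by
      calc D.filter (fun x => !((paired.add v).contains x))
          = D.filter (fun x => !(paired.contains x) && !(x == v)) := by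
            refine List.filter_congr (fun x _ => ?_)
            rw [hcadd x, Bool.not_or]
        _ = (D.filter (fun x => !(paired.contains x))).filter (fun x => !(x == v)) := by
            rw [List.filter_filter]
            exact List.filter_congr (fun x _ => Bool.and_comm _ _)
        _ = rem.filter (fun x => !(x == v)) := by rw [← hrem]
        _ = rem.eraseIdx i := by rw [hvdef]; exact filter_ne_eq_eraseIdx rem hremnd i hilt
    have hlen' : ks.length ≤ (rem.eraseIdx i).length := by
      rw [List.length_eraseIdx_of_lt hilt]
      simp only [List.length_cons] at hlen
      omega
    exact ih (paired.add v) (rem.eraseIdx i) (pairs ++ [[v, k]]) hinv.symm hlen'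

-- ===== VERDICT (by name: the statement is the Claim_ definition above) =====
theorem race_spec : Claim_equal_race := by
  intro horses king_horses _hdom hpre
  unfold Spec_race race race_alt
  have hD := PySem.List.sorted_ofList_pairwise_lt (κ := Int) horses
  refine raceLoop_eq_raceAltLoop _ _ (PySem.List.sorted_pairwise horses (fun x => x)) hD
    (fun x => by
      rw [PySem.List.mem_sorted, PySem.List.mem_sorted, PySem.Set.mem_ofList])
    king_horses PySem.Set.empty _ [] ?_ ?_
  · simp [PySem.Set.empty]
  · rw [PySem.List.length_sorted]
    simpa using hpre
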